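-- pv_equiv track=rewrite | github.com/blainehansen/exam-playground | solved/tetris.py | row_filled
-- ===== SOURCE A (Python) =====
-- def row_filled(dropping_position, figure_row, field_row):
-- 	width = len(field_row)
-- 	for field_index in range(width):
-- 		in_figure = field_index >= dropping_position and field_index < dropping_position + 3
-- 		figure_index = field_index - dropping_position
--
-- 		occupied = field_row[field_index] == 1 or (in_figure and figure_row[figure_index] == 1)
--
-- 		if not occupied:
-- 			return False
--
-- 	return True
-- ===== SOURCE B (Python) =====
-- def row_filled(dropping_position, figure_row, field_row):
-- 	# Row is filled iff the set of filled positions - field cells equal to 1, plus the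
-- 	# in-range positions the figure's 1-cells land on - covers every index of the row.
-- 	width = len(field_row)
-- 	filled = {i for i, cell in enumerate(field_row) if cell == 1}
-- 	filled.update(dropping_position + k
-- 	              for k, cell in enumerate(figure_row[:3])
-- 	              if cell == 1 and 0 <= dropping_position + k < width)
-- 	return len(filled) == width
-- ===== Notes on version B (the rewrite author's own statement) =====
-- stated objective: alternative
-- what changed: A scans the row cell by cell with an early return, testing each cell as 'field is 1 OR the figure window covers it with a 1'; B never tests cells: it builds the set of filled positions (indices of 1-cells of the field, unioned with the in-range positions the figure's 1-cells land on) and declares the row filled iff that set's cardinality equals the row width.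
import Mathlib
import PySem

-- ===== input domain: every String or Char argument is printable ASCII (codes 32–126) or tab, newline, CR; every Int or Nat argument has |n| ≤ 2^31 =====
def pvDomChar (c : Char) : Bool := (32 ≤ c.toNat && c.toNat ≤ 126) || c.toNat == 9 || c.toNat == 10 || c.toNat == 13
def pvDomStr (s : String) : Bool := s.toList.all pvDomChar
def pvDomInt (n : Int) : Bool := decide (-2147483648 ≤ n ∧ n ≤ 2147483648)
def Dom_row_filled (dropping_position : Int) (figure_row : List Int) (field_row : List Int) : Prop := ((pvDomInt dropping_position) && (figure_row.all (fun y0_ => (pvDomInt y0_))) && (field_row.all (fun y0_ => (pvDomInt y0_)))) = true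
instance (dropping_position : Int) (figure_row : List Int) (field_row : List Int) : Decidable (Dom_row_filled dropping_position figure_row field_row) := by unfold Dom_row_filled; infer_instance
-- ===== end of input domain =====

-- B replaces A's per-cell scan with a set-cardinality test: the set of filled positions
-- (field 1-cells plus the figure's landed 1-cells) must cover the whole row (objective: alternative).

-- ===== PORT A =====
-- the loop body of A; the early `return False` is the `else false` branch
def rowFilledGo (dropping_position : Int) (figure_row field_row : List Int) : List Int → Bool
  | [] => true
  | field_index :: rest =>
    let in_figure := decide (field_index ≥ dropping_position) && decide (field_index < dropping_position + 3)
    let figure_index := field_index - dropping_position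
    let occupied := (PySem.List.pyGet? field_row field_index == some 1) ||
                    (in_figure && (PySem.List.pyGet? figure_row figure_index == some 1))
    if occupied then rowFilledGo dropping_position figure_row field_row rest else false

def row_filled (dropping_position : Int) (figure_row : List Int) (field_row : List Int) : Bool :=
  rowFilledGo dropping_position figure_row field_row (PySem.List.pyRange 0 field_row.length 1)

-- ===== PORT B =====
def row_filled_alt (dropping_position : Int) (figure_row : List Int) (field_row : List Int) : Bool :=
  let width : Int := field_row.length
  -- {i for i, cell in enumerate(field_row) if cell == 1}
  let filled : PySem.Set Int :=
    PySem.Set.ofList (((PySem.List.enumerate field_row).filter (fun p => p.2 == 1)).map (fun p => p.1))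
  -- filled.update(dropping_position + k for k, cell in enumerate(figure_row[:3]) if cell == 1 and 0 <= dropping_position + k < width)
  let filled := PySem.Set.update filled
    (((PySem.List.enumerate (PySem.List.slice figure_row none (some 3))).filter
        (fun p => p.2 == 1 && decide (0 ≤ dropping_position + p.1) && decide (dropping_position + p.1 < width))).map
      (fun p => dropping_position + p.1))
  PySem.Set.len filled == width

-- ===== PRECONDITION & SPEC =====
-- On inputs whose first gap in the row lies inside the 3-wide figure window but past the end of a
-- too-short figure_row, Python A raises IndexError (B would return False: the gap is not covered).
-- Pre_ excludes exactly those inputs: the cells before the raising one must all be occupied,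
-- or else A returns False before reaching it.
def Pre_row_filled (dropping_position : Int) (figure_row : List Int) (field_row : List Int) : Prop :=
  ¬ ∃ i : Nat, i < field_row.length ∧
    PySem.List.pyGet? field_row (i : Int) ≠ some 1 ∧
    dropping_position ≤ (i : Int) ∧ (i : Int) < dropping_position + 3 ∧
    (figure_row.length : Int) ≤ (i : Int) - dropping_position ∧
    ∀ j : Nat, j < i →
      (PySem.List.pyGet? field_row (j : Int) = some 1 ∨
       (dropping_position ≤ (j : Int) ∧ (j : Int) < dropping_position + 3 ∧
        PySem.List.pyGet? figure_row ((j : Int) - dropping_position) = some 1))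
instance (dropping_position : Int) (figure_row : List Int) (field_row : List Int) : Decidable (Pre_row_filled dropping_position figure_row field_row) := by unfold Pre_row_filled; infer_instance

def pvWitness_row_filled : Int × List Int × List Int := (1, [1, 0, 1], [0, 1, 1, 0])
def Spec_row_filled (dropping_position : Int) (figure_row : List Int) (field_row : List Int) (out : Bool) : Prop := out = row_filled_alt dropping_position figure_row field_row
instance (dropping_position : Int) (figure_row : List Int) (field_row : List Int) (out : Bool) : Decidable (Spec_row_filled dropping_position figure_row field_row out) := by unfold Spec_row_filled; infer_instance

-- ===== CLAIM (what is proved, stated in full; the proofs are below) =====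
def Claim_equal_row_filled : Prop := ∀ (dropping_position : Int) (figure_row : List Int) (field_row : List Int), Dom_row_filled dropping_position figure_row field_row → Pre_row_filled dropping_position figure_row field_row → Spec_row_filled dropping_position figure_row field_row (row_filled dropping_position figure_row field_row)

-- ===== LEMMAS AND PROOFS =====

-- A's per-cell test (proof helper; port A computes it inline in its loop)
def cellA (dp : Int) (fig field : List Int) (i : Int) : Bool :=
  (PySem.List.pyGet? field i == some 1) ||
  ((decide (i ≥ dp) && decide (i < dp + 3)) && (PySem.List.pyGet? fig (i - dp) == some 1))

-- A's loop with early exit is List.all of its per-cell test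
theorem rowFilledGo_eq_all (dp : Int) (fig field l : List Int) :
    rowFilledGo dp fig field l = l.all (cellA dp fig field) := by
  induction l with
  | nil => rfl
  | cons x rest ih =>
    simp only [rowFilledGo, List.all_cons, ih, cellA]
    cases h : ((PySem.List.pyGet? field x == some 1) ||
      ((decide (x ≥ dp) && decide (x < dp + 3)) && (PySem.List.pyGet? fig (x - dp) == some 1))) <;>
      simp

theorem cellA_eq_true_iff (dp : Int) (fig field : List Int) (j : Nat) (hj : j < field.length) :
    cellA dp fig field (j : Int) = true ↔
      (field[j] = 1 ∨ (dp ≤ (j:Int) ∧ (j:Int) < dp + 3 ∧ PySem.List.pyGet? fig ((j:Int) - dp) = some 1)) := by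
  rw [cellA]
  simp [PySem.List.pyGet?_natCast, List.getElem?_eq_getElem hj, and_assoc]

theorem rowA_iff (dp : Int) (fig field : List Int) :
    row_filled dp fig field = true ↔
      ∀ j : Nat, (hj : j < field.length) → cellA dp fig field (j : Int) = true := by
  rw [row_filled, rowFilledGo_eq_all, List.all_eq_true]
  constructor
  · intro h j hj
    exact h _ (by rw [PySem.List.mem_pyRange_one]; constructor <;> omega)
  · intro h i hi
    rw [PySem.List.mem_pyRange_one] at hi
    have hcast : i = ((i.toNat : Nat) : Int) := by omega
    rw [hcast]
    exact h i.toNat (by omega)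

-- B's two index lists, named (syntactically the lists the port builds inline)
def fieldIdx (field : List Int) : List Int :=
  ((PySem.List.enumerate field).filter (fun p => p.2 == 1)).map (fun p => p.1)
def figIdx (dp : Int) (fig field : List Int) : List Int :=
  ((PySem.List.enumerate (PySem.List.slice fig none (some 3))).filter
      (fun p => p.2 == 1 && decide (0 ≤ dp + p.1) && decide (dp + p.1 < (field.length : Int)))).map
    (fun p => dp + p.1)

theorem mem_fieldIdx (field : List Int) (x : Int) :
    x ∈ fieldIdx field ↔ ∃ k : Nat, ∃ h : k < field.length, x = (k : Int) ∧ field[k] = 1 := by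
  simp only [fieldIdx, List.mem_map, List.mem_filter, PySem.List.mem_enumerate_iff]
  constructor
  · rintro ⟨p, ⟨⟨k, hk, hp⟩, hb⟩, hx⟩
    subst hp
    refine ⟨k, hk, by simpa using hx.symm, by simpa using hb⟩
  · rintro ⟨k, hk, rfl, h1⟩
    exact ⟨((k:Int), field[k]), ⟨⟨k, hk, by simp⟩, by simpa using h1⟩, rfl⟩

theorem mem_figIdx (dp : Int) (fig field : List Int) (x : Int) :
    x ∈ figIdx dp fig field ↔
      ∃ k : Nat, ∃ h : k < min 3 fig.length, x = dp + (k : Int) ∧ fig[k] = 1 ∧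
        0 ≤ dp + (k : Int) ∧ dp + (k : Int) < (field.length : Int) := by
  have hsl : PySem.List.slice fig none (some 3) = fig.take 3 :=
    PySem.List.slice_to fig (by norm_num)
  simp only [figIdx, hsl, List.mem_map, List.mem_filter, PySem.List.mem_enumerate_iff]
  constructor
  · rintro ⟨p, ⟨⟨k, hk, hp⟩, hb⟩, hx⟩
    subst hp
    simp only [List.length_take, lt_inf_iff] at hk
    have hkm : k < min 3 fig.length := by omega
    have hg : (fig.take 3)[k]'(by simp; omega) = fig[k]'(by omega) := List.getElem_take
    simp only [Bool.and_eq_true, beq_iff_eq, decide_eq_true_eq] at hb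
    refine ⟨k, hkm, by simpa using hx.symm, ?_, ?_, ?_⟩
    · rw [← hg]; exact hb.1.1
    · simpa using hb.1.2
    · simpa using hb.2
  · rintro ⟨k, hk, rfl, h1, h2, h3⟩
    have hk3 : k < (fig.take 3).length := by simp; omega
    refine ⟨((k:Int), (fig.take 3)[k]), ⟨⟨k, hk3, by simp⟩, ?_⟩, rfl⟩
    simp only [Bool.and_eq_true, beq_iff_eq, decide_eq_true_eq]
    exact ⟨⟨by simpa [List.getElem_take] using h1, by simpa using h2⟩, by simpa using h3⟩

-- the set B builds, named
def filledSet (dp : Int) (fig field : List Int) : PySem.Set Int :=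
  PySem.Set.update (PySem.Set.ofList (fieldIdx field)) (figIdx dp fig field)

theorem mem_filledSet (dp : Int) (fig field : List Int) (x : Int) :
    x ∈ filledSet dp fig field ↔ x ∈ fieldIdx field ∨ x ∈ figIdx dp fig field := by
  rw [filledSet, PySem.Set.mem_update, PySem.Set.mem_ofList]

theorem mem_filledSet_iff_cellA (dp : Int) (fig field : List Int) (j : Nat) (hj : j < field.length) :
    (j : Int) ∈ filledSet dp fig field ↔ cellA dp fig field (j : Int) = true := by
  rw [mem_filledSet, cellA_eq_true_iff dp fig field j hj, mem_fieldIdx, mem_figIdx]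
  constructor
  · rintro (⟨k, hk, hkj, h1⟩ | ⟨k, hk, hkj, h1, h2, h3⟩)
    · left
      have : j = k := by exact_mod_cast hkj
      subst this; exact h1
    · right
      have hdk : (j : Int) - dp = (k : Nat) := by omega
      refine ⟨by omega, by omega, ?_⟩
      rw [hdk, PySem.List.pyGet?_natCast, List.getElem?_eq_getElem (by omega)]
      simp [h1]
  · rintro (h1 | ⟨hw1, hw2, hg⟩)
    · exact Or.inl ⟨j, hj, rfl, h1⟩
    · right
      have hk0 : 0 ≤ (j : Int) - dp := by omega
      set k : Nat := ((j : Int) - dp).toNat with hkdef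
      have hdk : (j : Int) - dp = (k : Int) := by omega
      rw [hdk, PySem.List.pyGet?_natCast] at hg
      obtain ⟨hklen, hfk⟩ := List.getElem?_eq_some_iff.mp hg
      exact ⟨k, by omega, by omega, hfk, by omega, by
        have : dp + (k : Int) = (j : Int) := by omega
        rw [this]; exact_mod_cast hj⟩

theorem filledSet_sub (dp : Int) (fig field : List Int) :
    ∀ x ∈ filledSet dp fig field, ∃ k : Nat, k < field.length ∧ x = (k : Int) := by
  intro x hx
  rw [mem_filledSet, mem_fieldIdx, mem_figIdx] at hx
  rcases hx with ⟨k, hk, rfl, _⟩ | ⟨k, hk, rfl, _, h2, h3⟩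
  · exact ⟨k, hk, rfl⟩
  · exact ⟨(dp + (k:Int)).toNat, by omega, by omega⟩

-- a nodup list of indices drawn from {0,…,n-1} has length n iff it covers all of them
theorem card_cover (n : Nat) (S : List Int) (hnd : S.Nodup)
    (hsub : ∀ x ∈ S, ∃ k : Nat, k < n ∧ x = (k : Int)) :
    (S.length = n ↔ ∀ j : Nat, j < n → (j : Int) ∈ S) := by
  set T : List Int := List.map (fun k : Nat => (k : Int)) (List.range n) with hT
  have hTnd : T.Nodup := List.Nodup.map (fun a b h => by exact_mod_cast h) List.nodup_range
  have hTlen : T.length = n := by simp [hT]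
  have hST : S ⊆ T := by
    intro x hx
    obtain ⟨k, hk, rfl⟩ := hsub x hx
    exact List.mem_map.mpr ⟨k, List.mem_range.mpr hk, rfl⟩
  have hsp : S.Subperm T := hnd.subperm hST
  constructor
  · intro hlen j hjn
    have hperm : S.Perm T := hsp.perm_of_length_le (by omega)
    exact hperm.mem_iff.mpr (List.mem_map.mpr ⟨j, List.mem_range.mpr hjn, rfl⟩)
  · intro hall
    have hTS : T ⊆ S := by
      intro x hx
      obtain ⟨k, hk, rfl⟩ := List.mem_map.mp hx
      exact hall k (List.mem_range.mp hk)
    have := (hTnd.subperm hTS).length_le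
    have := hsp.length_le
    omega

theorem row_filled_total_eq (dp : Int) (fig field : List Int) :
    row_filled dp fig field = row_filled_alt dp fig field := by
  have halt : row_filled_alt dp fig field =
      (PySem.Set.len (filledSet dp fig field) == (field.length : Int)) := rfl
  have hiff : (PySem.Set.len (filledSet dp fig field) == (field.length : Int)) = true ↔
      (filledSet dp fig field).length = field.length := by
    simp [PySem.Set.len]
  have hnd : (filledSet dp fig field).Nodup :=
    PySem.Set.nodup_update _ _ (PySem.Set.nodup_ofList (fieldIdx field))
  rw [Bool.eq_iff_iff, rowA_iff, halt, hiff,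
    card_cover field.length _ hnd (filledSet_sub dp fig field)]
  constructor
  · intro h j hj
    exact (mem_filledSet_iff_cellA dp fig field j hj).mpr (h j hj)
  · intro h j hj
    exact (mem_filledSet_iff_cellA dp fig field j hj).mp (h j hj)

-- ===== VERDICT (by name: the statement is the Claim_ definition above) =====
theorem row_filled_spec : Claim_equal_row_filled := by
  intro dp fig field _ _
  unfold Spec_row_filled
  exact row_filled_total_eq dp fig field
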